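-- pv_equiv track=rewrite | github.com/loopy-dev/algorithm-v2 | programmers/pccp_pcce/pccp_2.py | solution
-- ===== SOURCE A (Python) =====
-- def solution(ability):
--     s = set()
--     answer_set = set()
--
--     def backtrack(idx, current):
--         if idx == len(ability[0]):
--             answer_set.add(current)
--             return
--
--         for i in range(len(ability)):
--             if i in s:
--                 continue
--             s.add(i)
--             backtrack(idx + 1, current + ability[i][idx])
--             s.remove(i)
--
--     backtrack(0, 0)
--     return max(list(answer_set))
-- ===== SOURCE B (Python) =====
-- def solution(ability):
--     n = len(ability)
--     k = len(ability[0])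
--     # dp[mask] = best total for columns idx..k-1 given rows in mask are already used
--     dp = [0] * (1 << n)
--     for idx in range(k - 1, -1, -1):
--         ndp = []
--         for mask in range(1 << n):
--             best = None
--             for i in range(n):
--                 if not (mask >> i) & 1 and dp[mask | (1 << i)] is not None:
--                     v = ability[i][idx] + dp[mask | (1 << i)]
--                     if best is None or v > best:
--                         best = v
--             ndp.append(best)
--         dp = ndp
--     return dp[0]
-- ===== Notes on version B (the rewrite author's own statement) =====
-- stated objective: faster
-- what changed: A enumerates every injective assignment of rows to columns by recursive backtracking, collects all sums in a set and takes the max; B computes the same maximum with a backward bitmask dynamic program over subsets of used rows (dp[mask] = best completion), never enumerating permutations.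
import Mathlib
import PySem

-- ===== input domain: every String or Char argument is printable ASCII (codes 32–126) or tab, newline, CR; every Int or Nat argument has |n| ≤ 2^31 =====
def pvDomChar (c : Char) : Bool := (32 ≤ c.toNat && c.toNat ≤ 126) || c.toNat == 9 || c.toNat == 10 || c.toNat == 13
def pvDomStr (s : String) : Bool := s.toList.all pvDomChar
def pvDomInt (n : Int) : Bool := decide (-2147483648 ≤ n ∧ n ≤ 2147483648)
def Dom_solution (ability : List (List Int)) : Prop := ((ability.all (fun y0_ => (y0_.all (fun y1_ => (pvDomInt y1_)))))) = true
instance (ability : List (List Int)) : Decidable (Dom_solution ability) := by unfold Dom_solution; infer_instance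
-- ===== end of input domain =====

-- B replaces A's factorial backtracking over all row permutations by a backward
-- bitmask dynamic program over subsets of used rows (objective: faster, asymptotic).

-- shared cell accessor: ability[i][idx]; total via getD, exact whenever i/idx are
-- in range, which Pre_solution guarantees for every access either program makes
def abGet (ability : List (List Int)) (i idx : Nat) : Int :=
  (ability.getD i []).getD idx 0

-- ===== PORT A =====
-- A's backtrack(idx, current): recursion ported with fuel = k - idx (Python stops
-- when idx == k); s is the Python set of used row indices, acc the answer_set.
def btA (ability : List (List Int)) (n : Nat) :
    Nat → Nat → Int → PySem.Set Nat → PySem.Set Int → PySem.Set Int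
  | 0, _idx, current, _s, acc => PySem.Set.add acc current
  | fuel+1, idx, current, s, acc =>
      (List.range n).foldl
        (fun acc i =>
          if PySem.Set.contains s i then acc
          else btA ability n fuel (idx+1) (current + abGet ability i idx)
                 (PySem.Set.add s i) acc)
        acc

-- max(list(answer_set)): max without key is order-independent, so taken over the
-- Set's element list; .getD 0 is unreachable under Pre_solution (nonempty set).
def solution (ability : List (List Int)) : Int :=
  let n := ability.length
  let k := (ability.getD 0 []).length
  let answer := btA ability n k 0 0 PySem.Set.empty PySem.Set.empty
  (PySem.List.max? answer (fun y => y)).getD 0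

-- ===== PORT B =====
-- one layer of the backward DP: ndp[mask] = best over free rows i of
-- ability[i][idx] + dp[mask | 1<<i] (None = no completion), built mask by mask
def dpStep (ability : List (List Int)) (n idx : Nat) (dp : List (Option Int)) :
    List (Option Int) :=
  (List.range (2 ^ n)).map (fun mask =>
    (List.range n).foldl
      (fun best i =>
        if ((mask >>> i) &&& 1) == 0 then
          match dp.getD (mask ||| (1 <<< i)) none with
          | none => best
          | some w =>
            match best with
            | none => some (abGet ability i idx + w)
            | some b =>
              if abGet ability i idx + w > b then some (abGet ability i idx + w)
              else some b
        else best)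
      none)

-- Python B returns dp[0] (None when no full assignment exists, outside
-- Pre_solution); ported as .getD 0, unreachable under Pre_solution.
def solution_alt (ability : List (List Int)) : Int :=
  let n := ability.length
  let k := (ability.getD 0 []).length
  let dp0 : List (Option Int) := List.replicate (2 ^ n) (some 0)
  let dpF := (List.range k).reverse.foldl (fun dp idx => dpStep ability n idx dp) dp0
  ((dpF.getD 0 none).getD 0)

-- ===== PRECONDITION & SPEC =====
-- Pre_ excludes exactly the inputs where Python A raises: the empty list
-- (IndexError on ability[0]), a row shorter than row 0 (IndexError), and more
-- columns than rows (max() of an empty set, ValueError); Python B raises or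
-- returns None on the same inputs.
def Pre_solution (ability : List (List Int)) : Prop :=
  ability ≠ [] ∧ (ability.headD []).length ≤ ability.length ∧
    ∀ row ∈ ability, (ability.headD []).length ≤ row.length
instance (ability : List (List Int)) : Decidable (Pre_solution ability) := by
  unfold Pre_solution; infer_instance

def pvWitness_solution : List (List Int) := [[1, 2], [3, 4], [5, 6]]

def Spec_solution (ability : List (List Int)) (out : Int) : Prop := out = solution_alt ability
instance (ability : List (List Int)) (out : Int) : Decidable (Spec_solution ability out) := by
  unfold Spec_solution; infer_instance

-- ===== CLAIM (what is proved, stated in full; the proofs are below) =====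
def Claim_equal_solution : Prop := ∀ (ability : List (List Int)), Dom_solution ability → Pre_solution ability → Spec_solution ability (solution ability)

-- ===== LEMMAS AND PROOFS =====

-- option-valued maximum combination (none = no completion exists)
def omax : Option Int → Option Int → Option Int
  | none, b => b
  | a, none => a
  | some x, some y => some (max x y)

-- maximum of a list as an Option (none on empty)
def maxOpt : List Int → Option Int
  | [] => none
  | x :: t => some (t.foldl max x)

-- all completion sums from column idx on, with the rows of `mask` already used:
-- the common specification both ports are related to
def comps (ability : List (List Int)) (n : Nat) : Nat → Nat → Nat → List Int
  | 0, _idx, _mask => [0]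
  | fuel+1, idx, mask =>
      ((List.range n).filter (fun i => !mask.testBit i)).flatMap
        (fun i =>
          (comps ability n fuel (idx+1) (mask ||| (1 <<< i))).map
            (fun v => abGet ability i idx + v))

theorem omax_none_right (a : Option Int) : omax a none = a := by
  cases a <;> rfl

theorem omax_assoc (a b c : Option Int) : omax (omax a b) c = omax a (omax b c) := by
  cases a <;> cases b <;> cases c <;> simp [omax, max_assoc]

theorem foldl_max_max (l : List Int) : ∀ a b : Int, l.foldl max (max a b) = max a (l.foldl max b) := by
  induction l with
  | nil => intro a b; rfl
  | cons y t ih =>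
      intro a b
      simp only [List.foldl_cons, max_assoc, ih]

theorem maxOpt_append (l1 l2 : List Int) : maxOpt (l1 ++ l2) = omax (maxOpt l1) (maxOpt l2) := by
  cases l1 with
  | nil => simp [maxOpt, omax]
  | cons x t =>
      cases l2 with
      | nil => simp [maxOpt, omax_none_right]
      | cons y u =>
          simp only [maxOpt, List.cons_append, List.foldl_cons, List.foldl_append, omax]
          rw [← foldl_max_max]

theorem maxOpt_map_add (c : Int) (l : List Int) :
    maxOpt (l.map (fun v => c + v)) = (maxOpt l).map (fun v => c + v) := by
  cases l with
  | nil => rfl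
  | cons x t =>
      simp only [maxOpt, List.map_cons, Option.map_some]
      congr 1
      induction t generalizing x with
      | nil => rfl
      | cons y u ih =>
          simp only [List.map_cons, List.foldl_cons, max_add_add_left, ih]

theorem max?_eq_maxOpt (l : List Int) :
    PySem.List.max? l (fun y => y) = maxOpt l := by
  cases l with
  | nil => rfl
  | cons x t => rw [PySem.List.max?_id_cons]; rfl

theorem max?_congr_mem (l1 l2 : List Int) (h : ∀ x, x ∈ l1 ↔ x ∈ l2) :
    PySem.List.max? l1 (fun y => y) = PySem.List.max? l2 (fun y => y) := by
  cases h1 : PySem.List.max? l1 (fun y => y) with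
  | none =>
      rw [PySem.List.max?_eq_none_iff] at h1
      subst h1
      cases h2 : PySem.List.max? l2 (fun y => y) with
      | none => rfl
      | some m2 =>
          have := PySem.List.max?_mem h2
          exact absurd ((h m2).2 this) (List.not_mem_nil)
  | some m1 =>
      cases h2 : PySem.List.max? l2 (fun y => y) with
      | none =>
          rw [PySem.List.max?_eq_none_iff] at h2
          subst h2
          have := PySem.List.max?_mem h1
          exact absurd ((h m1).1 this) (List.not_mem_nil)
      | some m2 =>
          have hm1 := PySem.List.max?_mem h1
          have hm2 := PySem.List.max?_mem h2
          have le1 : m1 ≤ m2 := PySem.List.max?_isMax h2 m1 ((h m1).1 hm1)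
          have le2 : m2 ≤ m1 := PySem.List.max?_isMax h1 m2 ((h m2).2 hm2)
          exact congrArg some (le_antisymm le1 le2)

-- testBit of mask ||| (1 <<< i)
theorem testBit_or_one_shift (mask i j : Nat) :
    (mask ||| (1 <<< i)).testBit j = (mask.testBit j || (j == i)) := by
  rw [Nat.testBit_or, Nat.one_shiftLeft, Nat.testBit_two_pow]
  cases h : mask.testBit j
  · simp only [Bool.false_or]
    cases hji : (j == i)
    · simp only [decide_eq_false_iff_not]
      intro hij
      simp [hij] at hji
    · simp only [decide_eq_true_eq]
      exact (beq_iff_eq.1 hji).symm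
  · simp

-- the port's bit test equals ¬ testBit
theorem cond_eq_not_testBit (mask i : Nat) :
    (((mask >>> i) &&& 1) == 0) = !mask.testBit i := by
  have h1 : mask >>> i &&& 1 = mask / 2 ^ i % 2 := by
    rw [Nat.and_one_is_mod, Nat.shiftRight_eq_div_pow]
  have h2 : mask.testBit i = decide (mask / 2 ^ i % 2 = 1) := by
    rw [Nat.testBit, Nat.one_and_eq_mod_two, Nat.shiftRight_eq_div_pow]
    rcases Nat.mod_two_eq_zero_or_one (mask / 2 ^ i) with h | h <;> simp [h]
  rw [h1, h2]
  rcases Nat.mod_two_eq_zero_or_one (mask / 2 ^ i) with h | h <;> simp [h]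

-- membership in a Set after add
theorem contains_add_eq (s : PySem.Set Nat) (i j : Nat) :
    PySem.Set.contains (PySem.Set.add s i) j = (PySem.Set.contains s j || (j == i)) := by
  cases hc : (PySem.Set.contains s j || (j == i)) with
  | true =>
      apply (PySem.Set.contains_iff _ _).2
      rcases Bool.or_eq_true_iff.1 hc with h | h
      · exact (PySem.Set.mem_add _ _ _).2 (Or.inl ((PySem.Set.contains_iff _ _).1 h))
      · exact (PySem.Set.mem_add _ _ _).2 (Or.inr (beq_iff_eq.1 h))
  | false =>
      rcases Bool.or_eq_false_iff.1 hc with ⟨h1, h2⟩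
      cases hres : PySem.Set.contains (PySem.Set.add s i) j with
      | false => rfl
      | true =>
          rcases (PySem.Set.mem_add _ _ _).1 ((PySem.Set.contains_iff _ _).1 hres) with hm | rfl
          · rw [(PySem.Set.contains_iff _ _).2 hm] at h1; exact absurd h1 (by simp)
          · simp at h2

-- ===== A-side: backtracking collects {current + c | c ∈ comps} into acc =====
theorem bt_eq (ability : List (List Int)) (n : Nat) :
    ∀ (fuel idx : Nat) (mask : Nat) (s : PySem.Set Nat) (current : Int)
      (acc : PySem.Set Int),
      (∀ j, PySem.Set.contains s j = mask.testBit j) →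
      btA ability n fuel idx current s acc
        = (comps ability n fuel idx mask).foldl
            (fun a c => PySem.Set.add a (current + c)) acc := by
  intro fuel
  induction fuel with
  | zero =>
      intro idx mask s current acc _
      simp [btA, comps, List.foldl]
  | succ fuel ih =>
      intro idx mask s current acc hs
      show (List.range n).foldl _ acc = _
      rw [comps]
      have aux : ∀ (l : List Nat) (acc : PySem.Set Int),
          l.foldl
            (fun acc i =>
              if PySem.Set.contains s i then acc
              else btA ability n fuel (idx+1) (current + abGet ability i idx)
                     (PySem.Set.add s i) acc) acc
          = ((l.filter (fun i => !mask.testBit i)).flatMap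
              (fun i =>
                (comps ability n fuel (idx+1) (mask ||| (1 <<< i))).map
                  (fun v => abGet ability i idx + v))).foldl
              (fun a c => PySem.Set.add a (current + c)) acc := by
        intro l
        induction l with
        | nil => intro acc; rfl
        | cons i t iht =>
            intro acc
            cases hb : mask.testBit i with
            | true =>
                have hcont : PySem.Set.contains s i = true := by rw [hs i, hb]
                simp only [List.foldl_cons, List.filter_cons, hcont, if_true, hb,
                  Bool.not_true, Bool.false_eq_true, if_false]
                exact iht acc
            | false =>
                have hcont : PySem.Set.contains s i = false := by rw [hs i, hb]
                simp only [List.foldl_cons, List.filter_cons, hcont,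
                  Bool.false_eq_true, if_false, hb, Bool.not_false, if_true,
                  List.flatMap_cons, List.foldl_append]
                rw [iht]
                congr 1
                have hs' : ∀ j, PySem.Set.contains (PySem.Set.add s i) j
                    = (mask ||| (1 <<< i)).testBit j := by
                  intro j
                  rw [contains_add_eq, hs j, testBit_or_one_shift]
                rw [ih (idx+1) (mask ||| (1 <<< i)) (PySem.Set.add s i)
                  (current + abGet ability i idx) acc hs', List.foldl_map]
                congr 1
                funext a c
                rw [add_assoc]
      exact aux (List.range n) acc

-- ===== B-side: the inner row loop computes the flatMap maximum =====
theorem inner_fold (ability : List (List Int)) (n m idx mask : Nat)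
    (dp : List (Option Int)) :
    ∀ (l : List Nat) (b : Option Int),
      (∀ i ∈ l, dp.getD (mask ||| (1 <<< i)) none
          = maxOpt (comps ability n m (idx+1) (mask ||| (1 <<< i)))) →
      l.foldl
        (fun best i =>
          if ((mask >>> i) &&& 1) == 0 then
            match dp.getD (mask ||| (1 <<< i)) none with
            | none => best
            | some w =>
              match best with
              | none => some (abGet ability i idx + w)
              | some b =>
                if abGet ability i idx + w > b then some (abGet ability i idx + w)
                else some b
          else best) b
      = omax b (maxOpt ((l.filter (fun i => ((mask >>> i) &&& 1) == 0)).flatMap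
          (fun i =>
            (comps ability n m (idx+1) (mask ||| (1 <<< i))).map
              (fun v => abGet ability i idx + v)))) := by
  intro l
  induction l with
  | nil => intro b _; simp [maxOpt, omax_none_right]
  | cons i t ih =>
      intro b h
      simp only [List.foldl_cons, List.filter_cons]
      cases hc : (((mask >>> i) &&& 1) == 0) with
      | false =>
          simp only [Bool.false_eq_true, if_false]
          exact ih b (fun j hj => h j (List.mem_cons_of_mem _ hj))
      | true =>
          simp only [if_true, List.flatMap_cons, maxOpt_append,
            h i List.mem_cons_self]
          have step : (match maxOpt (comps ability n m (idx+1) (mask ||| (1 <<< i))) with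
              | none => b
              | some w =>
                match b with
                | none => some (abGet ability i idx + w)
                | some b0 =>
                  if abGet ability i idx + w > b0 then some (abGet ability i idx + w)
                  else some b0)
              = omax b (maxOpt ((comps ability n m (idx+1) (mask ||| (1 <<< i))).map
                  (fun v => abGet ability i idx + v))) := by
            rw [maxOpt_map_add]
            cases maxOpt (comps ability n m (idx+1) (mask ||| (1 <<< i))) with
            | none => cases b <;> rfl
            | some w =>
                cases b with
                | none => rfl
                | some b0 =>
                    simp only [Option.map_some, omax]
                    rcases lt_or_ge b0 (abGet ability i idx + w) with hlt | hge
                    · rw [if_pos hlt, max_eq_right hlt.le]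
                    · rw [if_neg (not_lt.2 hge), max_eq_left hge]
          rw [step, ih _ (fun j hj => h j (List.mem_cons_of_mem _ hj)), omax_assoc]

-- one DP layer preserves the invariant
theorem dpStep_getD (ability : List (List Int)) (n idx m : Nat)
    (dp : List (Option Int))
    (hdp : ∀ mask, dp.getD mask none
        = if mask < 2 ^ n then maxOpt (comps ability n m (idx+1) mask) else none) :
    ∀ mask, (dpStep ability n idx dp).getD mask none
        = if mask < 2 ^ n then maxOpt (comps ability n (m+1) idx mask) else none := by
  intro mask
  by_cases hm : mask < 2 ^ n
  · rw [dpStep, List.getD_eq_getElem?_getD, List.getElem?_map, List.getElem?_range hm]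
    simp only [Option.map_some, Option.getD_some, if_pos hm]
    have hfree : ∀ i ∈ List.range n,
        dp.getD (mask ||| (1 <<< i)) none
          = maxOpt (comps ability n m (idx+1) (mask ||| (1 <<< i))) := by
      intro i hi
      have hin : i < n := List.mem_range.1 hi
      have hlt : mask ||| (1 <<< i) < 2 ^ n := by
        apply Nat.or_lt_two_pow hm
        rw [Nat.one_shiftLeft]
        exact Nat.pow_lt_pow_right one_lt_two hin
      rw [hdp, if_pos hlt]
    rw [inner_fold ability n m idx mask dp (List.range n) none hfree]
    rw [show (fun i => (((mask >>> i) &&& 1) == 0))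
        = (fun i : Nat => !mask.testBit i) from funext (cond_eq_not_testBit mask)]
    show omax none _ = _
    rw [comps]
    rfl
  · rw [if_neg hm, dpStep, List.getD_eq_default]
    simp only [List.length_map, List.length_range]
    omega

-- the backward column loop establishes the invariant
theorem dpIter (ability : List (List Int)) (n k : Nat) :
    ∀ m, m ≤ k → ∀ mask,
      (((List.range' (k - m) m).reverse).foldl
          (fun dp idx => dpStep ability n idx dp)
          (List.replicate (2 ^ n) (some 0))).getD mask none
        = if mask < 2 ^ n then maxOpt (comps ability n m (k - m) mask) else none := by
  intro m
  induction m with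
  | zero =>
      intro _ mask
      simp only [List.range', List.reverse_nil, List.foldl_nil]
      rw [List.getD_eq_getElem?_getD, List.getElem?_replicate]
      by_cases hm : mask < 2 ^ n <;> simp [hm, comps, maxOpt]
  | succ m ih =>
      intro hk mask
      have h1 : k - (m + 1) + 1 = k - m := by omega
      rw [List.range'_succ, h1, List.reverse_cons, List.foldl_append]
      simp only [List.foldl_cons, List.foldl_nil]
      have := dpStep_getD ability n (k - (m+1)) m _
        (by intro mk; rw [h1]; exact ih (by omega) mk) mask
      rw [this]

-- membership in A's answer set equals membership in comps
theorem bt_mem (ability : List (List Int)) (n k : Nat) (x : Int) :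
    x ∈ btA ability n k 0 0 PySem.Set.empty PySem.Set.empty
      ↔ x ∈ comps ability n k 0 0 := by
  rw [bt_eq ability n k 0 0 PySem.Set.empty 0 PySem.Set.empty
    (by intro j; simp [PySem.Set.empty, Nat.zero_testBit, PySem.Set.contains])]
  rw [PySem.Set.mem_foldl_add]
  constructor
  · rintro (h | ⟨c, hc, rfl⟩)
    · exact absurd h List.not_mem_nil
    · rwa [zero_add]
  · intro h; exact Or.inr ⟨x, h, (zero_add x).symm⟩

-- ===== VERDICT (by name: the statement is the Claim_ definition above) =====
theorem solution_spec : Claim_equal_solution := by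
  intro ability _hdom _hpre
  show solution ability = solution_alt ability
  show (PySem.List.max? (btA ability ability.length (ability.getD 0 []).length 0 0
      PySem.Set.empty PySem.Set.empty) (fun y => y)).getD 0
    = ((((List.range (ability.getD 0 []).length).reverse.foldl
        (fun dp idx => dpStep ability ability.length idx dp)
        (List.replicate (2 ^ ability.length) (some 0))).getD 0 none).getD 0)
  have hA : PySem.List.max? (btA ability ability.length (ability.getD 0 []).length 0 0
      PySem.Set.empty PySem.Set.empty) (fun y => y)
      = maxOpt (comps ability ability.length (ability.getD 0 []).length 0 0) := by
    rw [max?_congr_mem _ _ (bt_mem ability ability.length (ability.getD 0 []).length),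
      max?_eq_maxOpt]
  have hB := dpIter ability ability.length (ability.getD 0 []).length
    (ability.getD 0 []).length le_rfl 0
  rw [Nat.sub_self, ← List.range_eq_range'] at hB
  rw [hA, hB, if_pos (Nat.two_pow_pos ability.length)]
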